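-- pv_equiv track=rewrite | github.com/mdallanegra/PDF-Extract-Rename-Programs | RenamePyPDF5.py | find_text_in_same_line
-- ===== SOURCE A (Python) =====
-- def find_text_in_same_line(text, keyword):
--     """
--     Find and return text that appears in the same line after the specified keyword.
--
--     :param text: The complete text to search within
--     :param keyword: The keyword to search for
--     :return: Text in the same line following the keyword
--     """
--     lines = text.split('\n')
--     for line in lines:
--         if keyword in line:
--             # Check if the keyword is followed by text on the same line
--             keyword_index = line.find(keyword) + len(keyword)
--             if keyword_index < len(line):
--                 return line[keyword_index:].strip()
--     return None
-- ===== SOURCE B (Python) =====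
-- def find_text_in_same_line(text, keyword):
--     """
--     Find and return text that appears in the same line after the specified keyword.
--
--     Scans the whole text with str.find instead of splitting it into lines.
--     """
--     if '\n' in keyword:
--         # a keyword containing a newline can never occur inside a single line
--         return None
--     pos = 0
--     while True:
--         k = text.find(keyword, pos)
--         if k == -1:
--             return None
--         end = k + len(keyword)
--         nl = text.find('\n', end)
--         stop = len(text) if nl == -1 else nl
--         if end < stop:
--             return text[end:stop].strip()
--         pos = stop + 1
-- ===== Notes on version B (the rewrite author's own statement) =====
-- stated objective: faster
-- what changed: Instead of splitting the text into a list of lines and scanning each line with 'in'+find, B runs str.find over the whole text, jumping from one keyword occurrence to the next and cutting the line out around the occurrence; keywords containing a newline (which can never lie in one line) return None up front.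
import Mathlib
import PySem

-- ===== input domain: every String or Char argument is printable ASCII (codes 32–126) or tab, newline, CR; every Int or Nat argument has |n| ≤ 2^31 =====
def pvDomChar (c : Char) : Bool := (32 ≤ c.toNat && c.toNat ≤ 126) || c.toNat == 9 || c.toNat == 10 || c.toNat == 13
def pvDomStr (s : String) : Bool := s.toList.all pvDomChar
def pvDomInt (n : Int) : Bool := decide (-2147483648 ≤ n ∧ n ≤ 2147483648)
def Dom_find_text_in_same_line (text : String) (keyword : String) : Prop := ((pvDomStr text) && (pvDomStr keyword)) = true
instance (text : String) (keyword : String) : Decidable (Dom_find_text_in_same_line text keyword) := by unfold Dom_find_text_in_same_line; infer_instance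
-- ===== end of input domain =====

-- B replaces A's split-into-lines + per-line scan by a single str.find loop over the whole
-- text, jumping from one keyword occurrence to the next.

-- ===== PORT A =====
-- the 'for line in lines' loop of A
def findA_go (kw : List Char) : List (List Char) → Option (List Char)
  | [] => none
  | line :: rest =>
    if PySem.Chars.isIn kw line then
      -- keyword_index = line.find(keyword) + len(keyword)
      let ki : Int := PySem.Chars.find line kw + kw.length
      if ki < (PySem.Chars.len line : Int) then
        some (PySem.Chars.strip (PySem.List.slice line (some ki) none))
      else findA_go kw rest
    else findA_go kw rest

def find_text_in_same_line (text : String) (keyword : String) : Option String :=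
  -- lines = text.split('\n'): the separator "\n" is nonempty, so Str.split? is
  -- some (Chars.splitOn …); we bind the lines and loop at the Chars layer
  Option.map String.ofList
    (findA_go keyword.toList (PySem.Chars.splitOn text.toList "\n".toList))

-- ===== PORT B =====
-- the 'while True' loop of B; the fuel argument only makes the loop total (pos grows by at
-- least 1 per iteration, so text.length + 2 iterations always suffice)
def findB_go (text kw : List Char) : Nat → Nat → Option (List Char)
  | 0, _ => none
  | fuel + 1, pos =>
    let k := PySem.Chars.findFrom text kw (pos : Int) none
    if k = -1 then none
    else
      let e : Nat := k.toNat + kw.length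
      let nl := PySem.Chars.findFrom text ['\n'] (e : Int) none
      let stop : Nat := if nl = -1 then text.length else nl.toNat
      if e < stop then
        some (PySem.Chars.strip (PySem.List.slice text (some (e : Int)) (some (stop : Int))))
      else findB_go text kw fuel (stop + 1)

def find_text_in_same_line_alt (text : String) (keyword : String) : Option String :=
  if PySem.Str.isIn "\n" keyword then none
  else Option.map String.ofList (findB_go text.toList keyword.toList (text.toList.length + 2) 0)

-- ===== PRECONDITION & SPEC =====
def Spec_find_text_in_same_line (text : String) (keyword : String) (out : Option String) : Prop := out = find_text_in_same_line_alt text keyword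
instance (text : String) (keyword : String) (out : Option String) : Decidable (Spec_find_text_in_same_line text keyword out) := by unfold Spec_find_text_in_same_line; infer_instance

-- ===== CLAIM (what is proved, stated in full; the proofs are below) =====
def Claim_equal_find_text_in_same_line : Prop := ∀ (text : String) (keyword : String), Dom_find_text_in_same_line text keyword → Spec_find_text_in_same_line text keyword (find_text_in_same_line text keyword)

-- ===== LEMMAS AND PROOFS =====

-- findFrom with a start index beyond the end finds nothing (CPython rule)
theorem pvFindFrom_neg_one_of_gt (s sub : List Char) (p : Nat) (hp : s.length < p) :
    PySem.Chars.findFrom s sub (p : Int) none = -1 := by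
  simp only [PySem.Chars.findFrom]
  split_ifs with h1 h2 <;> first | rfl | omega

-- B's loop from a position beyond the end returns none (whatever the fuel)
theorem pvB_none_of_gt (text kw : List Char) (fuel pos : Nat) (h : text.length < pos) :
    findB_go text kw fuel pos = none := by
  cases fuel with
  | zero => rfl
  | succ f =>
    rw [findB_go]
    simp only [pvFindFrom_neg_one_of_gt text kw pos h]
    rfl


theorem pvFind_eq (s sub : List Char) (j : Nat) (h1 : sub <+: s.drop j)
    (h2 : ∀ i < j, ¬ sub <+: s.drop i) : PySem.Chars.find s sub = (j : Int) := by
  have hinf : sub <:+: s := List.infix_iff_prefix_suffix.2 ⟨s.drop j, h1, List.drop_suffix j s⟩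
  have hnn : 0 ≤ PySem.Chars.find s sub := (PySem.Chars.find_nonneg_iff s sub).2 hinf
  obtain ⟨hpre, hmin⟩ := PySem.Chars.find_spec hnn
  rcases lt_trichotomy (PySem.Chars.find s sub).toNat j with h | h | h
  · exact absurd hpre (h2 _ h)
  · omega
  · exact absurd h1 (hmin j h)

def pvM (s : List Char) : Nat :=
  if PySem.Chars.find s ['\n'] = -1 then s.length else (PySem.Chars.find s ['\n']).toNat

theorem pvM_le (s : List Char) : pvM s ≤ s.length := by
  unfold pvM
  have := PySem.Chars.find_le_length s ['\n']
  have := PySem.Chars.neg_one_le_find s ['\n']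
  split_ifs <;> omega

theorem pvM_no_nl (s : List Char) : '\n' ∉ s.take (pvM s) := by
  intro hmem
  obtain ⟨i, hi, hget⟩ := List.getElem_of_mem hmem
  simp only [List.length_take] at hi
  have hil : i < s.length := lt_of_lt_of_le (lt_of_lt_of_le hi (min_le_right _ _)) (by
    have := pvM_le s; omega)
  have hgs : s[i] = '\n' := by
    rw [List.getElem_take] at hget; exact hget
  have hpre : ['\n'] <+: s.drop i := by
    refine ⟨s.drop (i+1), ?_⟩
    rw [List.drop_eq_getElem_cons hil, hgs]
    rfl
  have him : i < pvM s := lt_of_lt_of_le hi (min_le_left _ _)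
  unfold pvM at him
  split_ifs at him with hm
  · have := (PySem.Chars.find_eq_neg_one_iff s ['\n']).1 hm
    exact this (List.infix_iff_prefix_suffix.2 ⟨s.drop i, hpre, List.drop_suffix i s⟩)
  · have hnn : 0 ≤ PySem.Chars.find s ['\n'] := by
      have := PySem.Chars.neg_one_le_find s ['\n']; omega
    exact (PySem.Chars.find_spec hnn).2 i him hpre

theorem pvM_nl (s : List Char) (h : pvM s < s.length) : ['\n'] <+: s.drop (pvM s) := by
  unfold pvM at *
  split_ifs at * with hm
  · omega
  · have hnn : 0 ≤ PySem.Chars.find s ['\n'] := by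
      have := PySem.Chars.neg_one_le_find s ['\n']; omega
    exact (PySem.Chars.find_spec hnn).1


theorem pvGo_acc (sep : List Char) : ∀ (fuel : Nat) (l cur : List Char) (acc : List (List Char)),
    PySem.Chars.splitOn.go sep fuel l cur acc = acc.reverse ++ PySem.Chars.splitOn.go sep fuel l cur [] := by
  intro fuel
  induction fuel with
  | zero => intro l cur acc; simp [PySem.Chars.splitOn.go.eq_1]
  | succ n ih =>
    intro l cur acc
    cases l with
    | nil =>
      rw [PySem.Chars.splitOn.go.eq_2 sep (n+1) _ _ (by omega),
          PySem.Chars.splitOn.go.eq_2 sep (n+1) _ _ (by omega)]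
      simp
    | cons c rest =>
      rw [PySem.Chars.splitOn.go.eq_3, PySem.Chars.splitOn.go.eq_3]
      by_cases hp : sep.isPrefixOf (c :: rest)
      · simp only [hp, if_true]
        rw [ih _ [] (cur.reverse :: acc), ih _ [] [cur.reverse]]
        simp
      · simp only [hp, Bool.false_eq_true, if_false]
        exact ih _ _ acc

-- enough fuel: the result does not depend on the exact fuel
theorem pvGo_fuel (sep : List Char) (hsep : sep ≠ []) :
    ∀ (fuel fuel' : Nat) (l cur : List Char) (acc : List (List Char)),
      l.length < fuel → l.length < fuel' →
      PySem.Chars.splitOn.go sep fuel l cur acc = PySem.Chars.splitOn.go sep fuel' l cur acc := by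
  intro fuel
  induction fuel with
  | zero => intro fuel' l cur acc h; omega
  | succ n ih =>
    intro fuel' l cur acc h h'
    cases l with
    | nil =>
      rw [PySem.Chars.splitOn.go.eq_2 sep (n+1) _ _ (by omega),
          PySem.Chars.splitOn.go.eq_2 sep fuel' _ _ (by omega)]
    | cons c rest =>
      obtain ⟨n', rfl⟩ : ∃ n', fuel' = n' + 1 := ⟨fuel' - 1, by omega⟩
      rw [PySem.Chars.splitOn.go.eq_3, PySem.Chars.splitOn.go.eq_3]
      by_cases hp : sep.isPrefixOf (c :: rest)
      · simp only [hp, if_true]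
        apply ih
        all_goals
          have hsl : 0 < sep.length := List.length_pos_of_ne_nil hsep
          simp only [List.length_drop, List.length_cons] at *
          omega
      · simp only [hp, Bool.false_eq_true, if_false]
        apply ih <;> simp at * <;> omega

-- a run without newline is swallowed into cur
theorem pvGo_no_nl : ∀ (fuel : Nat) (l cur : List Char) (acc : List (List Char)),
    l.length < fuel → '\n' ∉ l →
    PySem.Chars.splitOn.go ['\n'] fuel l cur acc = acc.reverse ++ [cur.reverse ++ l] := by
  intro fuel
  induction fuel with
  | zero => intro l cur acc h; omega
  | succ n ih =>
    intro l cur acc hf hmem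
    cases l with
    | nil =>
      rw [PySem.Chars.splitOn.go.eq_2 _ (n+1) _ _ (by omega)]
      simp
    | cons c rest =>
      rw [PySem.Chars.splitOn.go.eq_3]
      have hc : c ≠ '\n' := fun h => hmem (by simp [h])
      have hp : (['\n']).isPrefixOf (c :: rest) = false := by
        simp [List.isPrefixOf, Ne.symm hc]
      rw [hp]
      simp only [Bool.false_eq_true, if_false]
      rw [ih rest (c :: cur) acc (by simp at hf ⊢; omega) (by simp at hmem; exact hmem.2)]
      simp

theorem pvGo_head : ∀ (fuel : Nat) (L t cur : List Char) (acc : List (List Char)),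
    L.length + t.length + 1 < fuel → '\n' ∉ L →
    PySem.Chars.splitOn.go ['\n'] fuel (L ++ '\n' :: t) cur acc =
      acc.reverse ++ (cur.reverse ++ L) :: PySem.Chars.splitOn.go ['\n'] (t.length + 1) t [] [] := by
  intro fuel
  induction fuel with
  | zero => intro L t cur acc h; omega
  | succ n ih =>
    intro L t cur acc hf hmem
    cases L with
    | nil =>
      rw [List.nil_append, PySem.Chars.splitOn.go.eq_3]
      have hp : (['\n']).isPrefixOf ('\n' :: t) = true := by simp [List.isPrefixOf]
      rw [hp]
      simp only [if_true]
      have hdrop : List.drop (['\n'] : List Char).length ('\n' :: t) = t := by simp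
      rw [hdrop, pvGo_acc]
      rw [pvGo_fuel ['\n'] (by simp) n (t.length + 1) t [] [] (by simp at hf; omega) (by omega)]
      simp
    | cons c L' =>
      rw [List.cons_append, PySem.Chars.splitOn.go.eq_3]
      have hc : c ≠ '\n' := fun h => hmem (by simp [h])
      have hp : (['\n']).isPrefixOf (c :: (L' ++ '\n' :: t)) = false := by
        simp [List.isPrefixOf, Ne.symm hc]
      rw [hp]
      simp only [Bool.false_eq_true, if_false]
      rw [ih L' t (c :: cur) acc (by simp only [List.length_cons] at hf ⊢; omega) (by simp at hmem; exact hmem.2)]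
      simp

theorem pvSplitOn_head (s : List Char) :
    PySem.Chars.splitOn s ['\n'] =
      s.take (pvM s) ::
        (if pvM s < s.length then PySem.Chars.splitOn (s.drop (pvM s + 1)) ['\n'] else []) := by
  by_cases hm : pvM s < s.length
  · have hget : s[pvM s]'hm = '\n' := by
      obtain ⟨u, hu⟩ := pvM_nl s hm
      have h1 : s.drop (pvM s) = s[pvM s] :: s.drop (pvM s + 1) := List.drop_eq_getElem_cons hm
      rw [h1] at hu
      simp only [List.singleton_append] at hu
      exact (List.cons_eq_cons.mp hu).1.symm
    have hs : s = s.take (pvM s) ++ '\n' :: s.drop (pvM s + 1) := by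
      conv_lhs => rw [← List.take_append_drop (pvM s) s]
      congr 1
      rw [List.drop_eq_getElem_cons hm, hget]
    have hlen : (s.take (pvM s)).length = pvM s := by
      simp [List.length_take]; omega
    rw [if_pos hm]
    show PySem.Chars.splitOn s ['\n'] = _
    unfold PySem.Chars.splitOn
    conv_lhs => rw [hs]
    rw [pvGo_head _ _ _ [] [] (by simp) (pvM_no_nl s)]
    simp
  · have hM : pvM s = s.length := by have := pvM_le s; omega
    have hnl : '\n' ∉ s := by
      have := pvM_no_nl s
      rwa [hM, List.take_length] at this
    rw [if_neg hm, hM, List.take_length]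
    unfold PySem.Chars.splitOn
    rw [pvGo_no_nl (s.length + 1) s [] [] (by omega) hnl]
    simp


-- positions before the first newline hold no newline
theorem pvNo_nl_before (s : List Char) (i : Nat) (hi : i < pvM s) :
    ¬ ['\n'] <+: s.drop i := by
  intro hpre
  unfold pvM at hi
  split_ifs at hi with hfind
  · exact (PySem.Chars.find_eq_neg_one_iff s ['\n']).1 hfind
      (List.infix_iff_prefix_suffix.2 ⟨s.drop i, hpre, List.drop_suffix i s⟩)
  · have hnn : 0 ≤ PySem.Chars.find s ['\n'] := by
      have := PySem.Chars.neg_one_le_find s ['\n']; omega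
    exact (PySem.Chars.find_spec hnn).2 i hi hpre

-- the first newline of s seen from position e' ≤ pvM s
theorem pvFind_nl (s : List Char) (e' : Nat) (he : e' ≤ pvM s) :
    PySem.Chars.find (s.drop e') ['\n'] =
      if pvM s < s.length then ((pvM s - e' : Nat) : Int) else -1 := by
  by_cases hm : pvM s < s.length
  · rw [if_pos hm]
    apply pvFind_eq
    · rw [List.drop_drop]
      have : e' + (pvM s - e') = pvM s := by omega
      rw [this]
      exact pvM_nl s hm
    · intro i hilt hpre
      rw [List.drop_drop] at hpre
      exact pvNo_nl_before s (e' + i) (by omega) hpre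
  · rw [if_neg hm]
    have hM : pvM s = s.length := by have := pvM_le s; omega
    rw [PySem.Chars.find_eq_neg_one_iff]
    intro hinf
    obtain ⟨q, hq⟩ := (PySem.Chars.exists_prefix_drop_iff_isIn ['\n'] (s.drop e')).2
      ((PySem.Chars.isIn_iff_infix _ _).2 hinf)
    rw [List.drop_drop] at hq
    have hlt : e' + q < s.length := by
      by_contra hge
      rw [List.drop_eq_nil_of_le (by omega)] at hq
      exact absurd hq.length_le (by simp)
    exact pvNo_nl_before s (e' + q) (by omega) hq

-- skipping a line that does not contain the keyword
theorem pvA_skip (kw L : List Char) (rest : List (List Char))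
    (h : PySem.Chars.isIn kw L = false) : findA_go kw (L :: rest) = findA_go kw rest := by
  simp [findA_go, h]

-- A's loop returns none when kw occurs nowhere in s
theorem pvA_none_of_not_infix (kw : List Char) :
    ∀ (n : Nat) (s : List Char), s.length ≤ n → ¬ kw <:+: s →
      findA_go kw (PySem.Chars.splitOn s ['\n']) = none := by
  intro n
  induction n with
  | zero =>
    intro s hl h
    have hs : s = [] := List.eq_nil_of_length_eq_zero (by omega)
    subst hs
    have h1 : PySem.Chars.splitOn ([] : List Char) ['\n'] = [[]] := by
      unfold PySem.Chars.splitOn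
      rw [PySem.Chars.splitOn.go.eq_2 _ _ _ _ (by simp)]
      rfl
    rw [h1, pvA_skip _ _ _ (by rw [PySem.Chars.isIn_eq_false_iff]; exact h)]
    rfl
  | succ n ih =>
    intro s hl h
    rw [pvSplitOn_head]
    have hL : PySem.Chars.isIn kw (s.take (pvM s)) = false := by
      rw [PySem.Chars.isIn_eq_false_iff]
      intro hinf
      exact h (hinf.trans (List.take_prefix _ _).isInfix)
    rw [pvA_skip _ _ _ hL]
    by_cases hm : pvM s < s.length
    · rw [if_pos hm]
      apply ih
      · simp only [List.length_drop]; omega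
      · intro hinf
        exact h (hinf.trans (List.drop_suffix _ _).isInfix)
    · rw [if_neg hm]
      rfl

-- A's loop returns none when kw contains a newline (no line can contain kw)
theorem pvA_none_of_nl_mem (kw : List Char) (hnl : '\n' ∈ kw) :
    ∀ (n : Nat) (s : List Char), s.length ≤ n →
      findA_go kw (PySem.Chars.splitOn s ['\n']) = none := by
  intro n
  induction n with
  | zero =>
    intro s hl
    have hs : s = [] := List.eq_nil_of_length_eq_zero (by omega)
    subst hs
    have h1 : PySem.Chars.splitOn ([] : List Char) ['\n'] = [[]] := by
      unfold PySem.Chars.splitOn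
      rw [PySem.Chars.splitOn.go.eq_2 _ _ _ _ (by simp)]
      rfl
    have hL : PySem.Chars.isIn kw [] = false := by
      rw [PySem.Chars.isIn_eq_false_iff]
      intro hinf
      exact absurd ((List.infix_nil).1 hinf ▸ hnl) (List.not_mem_nil)
    rw [h1, pvA_skip _ _ _ hL]
    rfl
  | succ n ih =>
    intro s hl
    rw [pvSplitOn_head]
    have hL : PySem.Chars.isIn kw (s.take (pvM s)) = false := by
      rw [PySem.Chars.isIn_eq_false_iff]
      intro hinf
      exact pvM_no_nl s (hinf.subset hnl)
    rw [pvA_skip _ _ _ hL]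
    by_cases hm : pvM s < s.length
    · rw [if_pos hm]
      apply ih
      simp only [List.length_drop]; omega
    · rw [if_neg hm]
      rfl

-- the main loop correspondence: B's whole-text scan from pos = A's loop over the lines of text.drop pos
theorem pvMain (text kw : List Char) (hkw : '\n' ∉ kw) :
    ∀ (n fuel pos : Nat), text.length + 1 - pos ≤ fuel → text.length + 1 - pos ≤ n →
      pos ≤ text.length →
      findB_go text kw fuel pos = findA_go kw (PySem.Chars.splitOn (text.drop pos) ['\n']) := by
  intro n
  induction n with
  | zero => intro fuel pos hf hn hpos; omega
  | succ n ih =>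
    intro fuel pos hf hn hpos
    obtain ⟨f, rfl⟩ : ∃ f, fuel = f + 1 := ⟨fuel - 1, by omega⟩
    have hfnat := PySem.Chars.findFrom_natCast text kw pos hpos
    by_cases hj : PySem.Chars.find (text.drop pos) kw = -1
    · have hkneg : PySem.Chars.findFrom text kw (pos:Int) none = -1 := by rw [hfnat, if_pos hj]
      rw [pvA_none_of_not_infix kw (text.drop pos).length (text.drop pos) le_rfl
        ((PySem.Chars.find_eq_neg_one_iff _ kw).1 hj)]
      rw [findB_go]
      simp only [hkneg]
      rfl
    · have hj0 : 0 ≤ PySem.Chars.find (text.drop pos) kw := by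
        have := PySem.Chars.neg_one_le_find (text.drop pos) kw; omega
      obtain ⟨hpre, hmin⟩ := PySem.Chars.find_spec hj0
      set j := (PySem.Chars.find (text.drop pos) kw).toNat with hjdef
      have hjeq : PySem.Chars.find (text.drop pos) kw = (j : Int) := (Int.toNat_of_nonneg hj0).symm
      have hslen : (text.drop pos).length = text.length - pos := by simp
      have hjkw : j + kw.length ≤ (text.drop pos).length := by
        have h1 := hpre.length_le
        simp only [List.length_drop] at h1
        have h2 := PySem.Chars.find_le_length (text.drop pos) kw
        simp only [List.length_drop] at h2 ⊢
        omega
      have hkval : PySem.Chars.findFrom text kw (pos:Int) none = ((pos + j : Nat) : Int) := by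
        rw [hfnat, if_neg hj, hjeq]
        push_cast
        ring
      have hC2 : j + kw.length ≤ pvM (text.drop pos) ∨ pvM (text.drop pos) + 1 ≤ j := by
        rcases Nat.lt_or_ge (pvM (text.drop pos)) (j + kw.length) with h1 | hc1
        swap
        · exact Or.inl hc1
        rcases Nat.lt_or_ge j (pvM (text.drop pos) + 1) with h2 | hc2
        swap
        · exact Or.inr hc2
        exfalso
        have hmle := pvM_le (text.drop pos)
        have hmlt : pvM (text.drop pos) < (text.drop pos).length := by omega
        obtain ⟨u, hu⟩ := pvM_nl (text.drop pos) hmlt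
        have hget : (text.drop pos)[pvM (text.drop pos)]'hmlt = '\n' := by
          rw [List.drop_eq_getElem_cons hmlt] at hu
          simp only [List.singleton_append] at hu
          exact (List.cons_eq_cons.mp hu).1.symm
        have hkwlen : pvM (text.drop pos) - j < kw.length := by omega
        have hgp := hpre.getElem hkwlen
        rw [List.getElem_drop] at hgp
        have hj2 : j + (pvM (text.drop pos) - j) = pvM (text.drop pos) := by omega
        simp only [hj2] at hgp
        have hfin : kw[pvM (text.drop pos) - j]'hkwlen = '\n' := hgp.trans hget
        exact hkw (hfin ▸ List.getElem_mem hkwlen)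
      have hmle := pvM_le (text.drop pos)
      rcases hC2 with hin | haf
      · -- the occurrence lies inside the first line of text.drop pos
        have hE : pos + j + kw.length ≤ text.length := by omega
        have hnlnat := PySem.Chars.findFrom_natCast text ['\n'] (pos + j + kw.length) hE
        have hdd : text.drop (pos + j + kw.length) = (text.drop pos).drop (j + kw.length) := by
          rw [List.drop_drop, ← Nat.add_assoc]
        have hfindnl := pvFind_nl (text.drop pos) (j + kw.length) hin
        have hstop : (if PySem.Chars.findFrom text ['\n'] ((pos + j + kw.length : Nat) : Int) none = -1
            then text.length
            else (PySem.Chars.findFrom text ['\n'] ((pos + j + kw.length : Nat) : Int) none).toNat)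
            = pos + pvM (text.drop pos) := by
          by_cases hm : pvM (text.drop pos) < (text.drop pos).length
          · have hnlval : PySem.Chars.findFrom text ['\n'] ((pos + j + kw.length : Nat) : Int) none
                = ((pos + pvM (text.drop pos) : Nat) : Int) := by
              rw [hnlnat, hdd, hfindnl, if_pos hm]
              have hne : ¬((pvM (text.drop pos) - (j + kw.length) : Nat) : Int) = -1 := by omega
              rw [if_neg hne]
              omega
            rw [hnlval]
            rw [if_neg (by omega)]
            omega
          · have hnlval : PySem.Chars.findFrom text ['\n'] ((pos + j + kw.length : Nat) : Int) none = -1 := by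
              rw [hnlnat, hdd, hfindnl, if_neg hm]
              simp
            rw [hnlval, if_pos rfl]
            omega
        -- the A side: the first line contains the keyword at relative index j
        have hLlen : ((text.drop pos).take (pvM (text.drop pos))).length = pvM (text.drop pos) := by
          simp only [List.length_take]
          omega
        have hpreL : kw <+: ((text.drop pos).take (pvM (text.drop pos))).drop j := by
          rw [List.drop_take]
          exact List.prefix_take_iff.2 ⟨hpre, by omega⟩
        have hfindL : PySem.Chars.find ((text.drop pos).take (pvM (text.drop pos))) kw = (j : Int) := by
          apply pvFind_eq _ _ _ hpreL
          intro i hilt hpL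
          rw [List.drop_take] at hpL
          exact hmin i hilt (List.prefix_take_iff.1 hpL).1
        have hisin : PySem.Chars.isIn kw ((text.drop pos).take (pvM (text.drop pos))) = true := by
          rw [PySem.Chars.isIn_iff_infix]
          exact List.infix_iff_prefix_suffix.2 ⟨_, hpreL, List.drop_suffix _ _⟩
        rw [pvSplitOn_head (text.drop pos)]
        rw [findB_go]
        simp only [hkval, Int.toNat_natCast]
        rw [if_neg (by omega)]
        rw [hstop]
        rcases Nat.lt_or_ge (j + kw.length) (pvM (text.drop pos)) with hret | hge
        · -- B returns; A returns on the first line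
          rw [if_pos (by omega)]
          simp only [findA_go, hisin, if_true, hfindL]
          rw [PySem.Chars.len_eq, hLlen]
          rw [if_pos (by omega)]
          have hcast : (j : Int) + (kw.length : Int) = ((j + kw.length : Nat) : Int) := by push_cast; ring
          rw [hcast]
          congr 1
          rw [PySem.List.slice_natCast, PySem.List.slice_from_natCast, List.drop_take, List.drop_drop]
          have h1 : pos + pvM (text.drop pos) - (pos + j + kw.length)
              = pvM (text.drop pos) - (j + kw.length) := by omega
          have h2 : pos + (j + kw.length) = pos + j + kw.length := by omega
          rw [h1, h2]
        · -- B skips to the next line; A falls through on the first line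
          have hskip : j + kw.length = pvM (text.drop pos) := by omega
          rw [if_neg (by omega)]
          simp only [findA_go, hisin, if_true, hfindL]
          rw [PySem.Chars.len_eq, hLlen]
          rw [if_neg (by omega)]
          by_cases hm : pvM (text.drop pos) < (text.drop pos).length
          · rw [if_pos hm]
            have hdd2 : (text.drop pos).drop (pvM (text.drop pos) + 1)
                = text.drop (pos + pvM (text.drop pos) + 1) := by
              rw [List.drop_drop, ← Nat.add_assoc]
            rw [hdd2]
            exact ih f (pos + pvM (text.drop pos) + 1) (by omega) (by omega) (by omega)
          · rw [if_neg hm]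
            exact pvB_none_of_gt text kw f (pos + pvM (text.drop pos) + 1) (by omega)
      · -- the first line does not contain the keyword: B's find already skipped past it
        have hkwpos : 0 < kw.length := by
          by_contra hz
          have hke : kw = [] := List.eq_nil_of_length_eq_zero (by omega)
          subst hke
          rw [PySem.Chars.find_nil] at hjeq
          omega
        have hm : pvM (text.drop pos) < (text.drop pos).length := by omega
        have hq : pos + pvM (text.drop pos) + 1 ≤ text.length := by omega
        have hdd3 : text.drop (pos + pvM (text.drop pos) + 1)
            = (text.drop pos).drop (pvM (text.drop pos) + 1) := by
          rw [List.drop_drop, ← Nat.add_assoc]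
        have hfind2 : PySem.Chars.find ((text.drop pos).drop (pvM (text.drop pos) + 1)) kw
            = ((j - (pvM (text.drop pos) + 1) : Nat) : Int) := by
          apply pvFind_eq
          · rw [List.drop_drop]
            have h3 : pvM (text.drop pos) + 1 + (j - (pvM (text.drop pos) + 1)) = j := by omega
            rw [h3]
            exact hpre
          · intro i hilt hpL
            rw [List.drop_drop] at hpL
            exact hmin _ (by omega) hpL
        have hkval2 : PySem.Chars.findFrom text kw ((pos + pvM (text.drop pos) + 1 : Nat) : Int) none
            = ((pos + j : Nat) : Int) := by
          rw [PySem.Chars.findFrom_natCast text kw _ hq, hdd3, hfind2]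
          rw [if_neg (by omega)]
          omega
        have hBeq : findB_go text kw (f + 1) pos
            = findB_go text kw (f + 1) (pos + pvM (text.drop pos) + 1) := by
          conv_lhs => rw [findB_go]
          conv_rhs => rw [findB_go]
          rw [hkval, hkval2]
        rw [hBeq, ih (f + 1) (pos + pvM (text.drop pos) + 1) (by omega) (by omega) (by omega), hdd3]
        rw [pvSplitOn_head (text.drop pos), if_pos hm]
        have hL : PySem.Chars.isIn kw ((text.drop pos).take (pvM (text.drop pos))) = false := by
          rw [PySem.Chars.isIn_eq_false_iff]
          intro hinf
          obtain ⟨q, hqpre⟩ := (PySem.Chars.exists_prefix_drop_iff_isIn kw _).2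
            ((PySem.Chars.isIn_iff_infix kw _).2 hinf)
          rw [List.drop_take] at hqpre
          have h1 := List.prefix_take_iff.1 hqpre
          exact hmin q (by omega) h1.1
        rw [pvA_skip _ _ _ hL]

-- ===== VERDICT (by name: the statement is the Claim_ definition above) =====
theorem find_text_in_same_line_spec : Claim_equal_find_text_in_same_line := by
  intro text keyword _
  unfold Spec_find_text_in_same_line find_text_in_same_line find_text_in_same_line_alt
  by_cases h : PySem.Str.isIn "\n" keyword
  · rw [if_pos h]
    have hm : '\n' ∈ keyword.toList := by
      have := (PySem.Str.isIn_iff_infix "\n" keyword).1 h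
      simpa using (List.singleton_infix_iff '\n' keyword.toList).1 (by simpa using this)
    have hnl : "\n".toList = ['\n'] := rfl
    rw [hnl, pvA_none_of_nl_mem keyword.toList hm text.toList.length text.toList le_rfl]
    rfl
  · rw [if_neg h]
    have hkw : '\n' ∉ keyword.toList := by
      intro hm
      exact h ((PySem.Str.isIn_iff_infix "\n" keyword).2
        (by simpa using (List.singleton_infix_iff '\n' keyword.toList).2 hm))
    have hmain := pvMain text.toList keyword.toList hkw (text.toList.length + 1)
      (text.toList.length + 2) 0 (by omega) (by omega) (Nat.zero_le _)
    rw [List.drop_zero] at hmain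
    have hnl : "\n".toList = ['\n'] := rfl
    rw [hnl, hmain]
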